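-- pv_equiv track=rewrite | github.com/MartinHvidberg/spamclam | src/filter_simple_bw/addr_book_reorder.py | line2lol
-- ===== SOURCE A (Python) =====
-- def line2lol(lin_in):
--     lst_legal = [c for c in ".@abcdefghijklmnopqrstuvwxyzæøå0123456789!#$%&'*+-/=?^_`{|}~"]
--     if '@' in lin_in:
--         loc_at = lin_in.find('@')
--         loc_beg = loc_at
--         while loc_beg > 0 and lin_in[loc_beg-1].lower() in lst_legal:
--             loc_beg -= 1
--         loc_end = loc_at
--         while loc_end < len(lin_in) and lin_in[loc_end].lower() in lst_legal:
--             loc_end += 1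
--         str_email = lin_in[loc_beg:loc_end]
--         str_head = lin_in[:loc_beg].strip()
--         str_tail = lin_in[loc_end:].strip()
--         #print "{}|{}|{}".format(str_head, str_email, str_tail).strip('|')
--         str_dom = '@'+str_email.split('@')[1]
--         return [str_dom, str_email, str_head, str_tail, lin_in.rstrip('\n')]
--     else:
--         return ['', '', '', '', lin_in]
-- ===== SOURCE B (Python) =====
-- def line2lol(lin_in):
--     legal = set(".@abcdefghijklmnopqrstuvwxyzæøå0123456789!#$%&'*+-/=?^_`{|}~")
--     if '@' not in lin_in:
--         return ['', '', '', '', lin_in]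
--     at = lin_in.find('@')
--     beg, end = _find_run(lin_in, at, legal)
--     email = lin_in[beg:end]
--     return ['@' + email.split('@')[1], email, lin_in[:beg].strip(),
--             lin_in[end:].strip(), lin_in.rstrip('\n')]
--
--
-- def _find_run(lin_in, at, legal):
--     """One forward scan: beg = 1 + last illegal index before `at`,
--     end = first illegal index after `at` (defaults 0 and len)."""
--     beg = 0
--     for i, ch in enumerate(lin_in):
--         if ch.lower() not in legal:
--             if i < at:
--                 beg = i + 1
--             else:
--                 return beg, i
--     return beg, len(lin_in)
-- ===== Notes on version B (the rewrite author's own statement) =====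
-- stated objective: alternative
-- what changed: A expands left and right from the first '@' with two while-loops and per-step membership tests against a list; B scans the line once left-to-right with a set, tracking 1 + the last illegal index before the '@' and stopping at the first illegal index after it, which yields the same maximal legal-character run.
import Mathlib
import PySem

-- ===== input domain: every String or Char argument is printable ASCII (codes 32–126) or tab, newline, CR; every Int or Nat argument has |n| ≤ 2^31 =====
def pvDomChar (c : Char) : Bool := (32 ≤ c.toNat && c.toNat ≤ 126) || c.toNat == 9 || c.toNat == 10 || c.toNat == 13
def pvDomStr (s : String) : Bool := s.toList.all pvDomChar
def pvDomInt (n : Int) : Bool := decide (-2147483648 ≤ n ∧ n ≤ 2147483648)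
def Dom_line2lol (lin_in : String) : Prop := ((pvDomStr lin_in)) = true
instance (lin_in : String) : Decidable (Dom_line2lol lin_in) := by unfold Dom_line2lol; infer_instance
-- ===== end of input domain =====

-- B replaces A's two while-loops that expand left and right from the first '@' by a single
-- forward scan locating the maximal legal-character run containing that '@' (objective: alternative).

-- ===== PORT A =====
-- lst_legal (the legal e-mail characters, lower-case)
def pvLegal : List Char := ".@abcdefghijklmnopqrstuvwxyzæøå0123456789!#$%&'*+-/=?^_`{|}~".toList

-- s.rstrip('\n'): PySem has no rstrip-with-chars primitive; exact hand port (drop trailing '\n')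
def pvRstripNl (cs : List Char) : List Char := (cs.reverse.dropWhile (· == '\n')).reverse

-- 'while loc_beg > 0 and lin_in[loc_beg-1].lower() in lst_legal: loc_beg -= 1'
-- (the getD default is never read: the index loc_beg-1 is below the position of '@', hence in range)
def pvBegLoop (l : List Char) : Nat → Nat
  | 0 => 0
  | b + 1 => if pvLegal.contains (PySem.Chars.lowerChar (l.getD b ' ')) then pvBegLoop l b else b + 1

-- 'while loc_end < len(lin_in) and lin_in[loc_end].lower() in lst_legal: loc_end += 1'
def pvEndLoop (l : List Char) (e : Nat) : Nat :=
  if h : e < l.length then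
    if pvLegal.contains (PySem.Chars.lowerChar l[e]) then pvEndLoop l (e + 1) else e
  else e
termination_by l.length - e

def line2lol (lin_in : String) : List String :=
  let l := lin_in.toList
  if PySem.Chars.isIn ['@'] l then
    let loc_at := (PySem.Chars.find l ['@']).toNat
    let loc_beg := pvBegLoop l loc_at
    let loc_end := pvEndLoop l loc_at
    let str_email := PySem.List.slice l (some (loc_beg : Int)) (some (loc_end : Int))
    let str_head := PySem.Chars.strip (PySem.List.slice l none (some (loc_beg : Int)))
    let str_tail := PySem.Chars.strip (PySem.List.slice l (some (loc_end : Int)) none)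
    let str_dom := '@' :: (PySem.Chars.splitOn str_email ['@']).getD 1 []
    [String.ofList str_dom, String.ofList str_email, String.ofList str_head, String.ofList str_tail,
     String.ofList (pvRstripNl l)]
  else ["", "", "", "", lin_in]

-- ===== PORT B =====
-- legal = set("...")
def pvLegalSet : PySem.Set Char :=
  PySem.Set.ofList ".@abcdefghijklmnopqrstuvwxyzæøå0123456789!#$%&'*+-/=?^_`{|}~".toList

-- _find_run: one forward scan; beg = 1 + last illegal index before at_, end = first illegal
-- index after at_ (defaults 0 and len); cs is the remaining suffix, i its start index
def pvFindRun (l : List Char) (at_ : Nat) : List Char → Nat → Nat → Nat × Nat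
  | [], _, beg => (beg, l.length)
  | c :: cs, i, beg =>
    if !(PySem.Set.contains pvLegalSet (PySem.Chars.lowerChar c)) then
      if i < at_ then pvFindRun l at_ cs (i + 1) (i + 1)
      else (beg, i)
    else pvFindRun l at_ cs (i + 1) beg

def line2lol_alt (lin_in : String) : List String :=
  let l := lin_in.toList
  if !(PySem.Chars.isIn ['@'] l) then ["", "", "", "", lin_in]
  else
    let at_ := (PySem.Chars.find l ['@']).toNat
    let r := pvFindRun l at_ l 0 0
    let email := PySem.List.slice l (some (r.1 : Int)) (some (r.2 : Int))
    [String.ofList ('@' :: (PySem.Chars.splitOn email ['@']).getD 1 []), String.ofList email,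
     String.ofList (PySem.Chars.strip (PySem.List.slice l none (some (r.1 : Int)))),
     String.ofList (PySem.Chars.strip (PySem.List.slice l (some (r.2 : Int)) none)),
     String.ofList (pvRstripNl l)]

-- ===== PRECONDITION & SPEC =====
def Spec_line2lol (lin_in : String) (out : List String) : Prop := out = line2lol_alt lin_in
instance (lin_in : String) (out : List String) : Decidable (Spec_line2lol lin_in out) := by unfold Spec_line2lol; infer_instance

-- ===== CLAIM (what is proved, stated in full; the proofs are below) =====
def Claim_equal_line2lol : Prop := ∀ (lin_in : String), Dom_line2lol lin_in → Spec_line2lol lin_in (line2lol lin_in)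

-- ===== LEMMAS AND PROOFS =====

-- whether a character counts as a legal e-mail character (A's membership test)
def pvL (c : Char) : Bool := pvLegal.contains (PySem.Chars.lowerChar c)

-- B's set is A's list (the legal-character string has no duplicate characters)
set_option maxRecDepth 8192 in
theorem pvLegalSet_eq_pvLegal : pvLegalSet = pvLegal := by decide

theorem pvGetD_eq {l : List Char} {e : Nat} (h : e < l.length) : l.getD e ' ' = l[e] := by
  simp [List.getD_eq_getElem?_getD, List.getElem?_eq_getElem h]

-- the suffix view: l.drop i = c :: cs pins l.getD i ' ' to c
theorem pvDrop_head {l cs : List Char} {c : Char} {i : Nat} (h : l.drop i = c :: cs) :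
    l.getD i ' ' = c ∧ i < l.length ∧ l.drop (i + 1) = cs := by
  have hlen := congrArg List.length h
  simp [List.length_drop] at hlen
  have h0 := congrArg (fun t : List Char => t[0]?) h
  simp [List.getElem?_drop] at h0
  refine ⟨by simp [List.getD_eq_getElem?_getD, h0], by omega, ?_⟩
  have h1 := congrArg (List.drop 1) h
  simpa [List.drop_drop] using h1

-- start of the maximal legal run containing position at_
def pvSBeg (l : List Char) (at_ b : Nat) : Prop :=
  b ≤ at_ ∧ (∀ j, b ≤ j → j < at_ → pvL (l.getD j ' ') = true) ∧
    (b = 0 ∨ pvL (l.getD (b - 1) ' ') = false)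

-- end of the maximal legal run containing position at_
def pvSEnd (l : List Char) (at_ e : Nat) : Prop :=
  at_ < e ∧ e ≤ l.length ∧ (∀ j, at_ ≤ j → j < e → pvL (l.getD j ' ') = true) ∧
    (e = l.length ∨ pvL (l.getD e ' ') = false)

theorem pvSBeg_unique {l : List Char} {at_ b1 b2 : Nat}
    (h1 : pvSBeg l at_ b1) (h2 : pvSBeg l at_ b2) : b1 = b2 := by
  obtain ⟨hb1, hi1, ho1⟩ := h1
  obtain ⟨hb2, hi2, ho2⟩ := h2
  by_contra hne
  rcases Nat.lt_or_ge b1 b2 with h | h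
  · rcases ho2 with h0 | hf
    · omega
    · have := hi1 (b2 - 1) (by omega) (by omega); rw [this] at hf; exact absurd hf (by simp)
  · have hlt : b2 < b1 := by omega
    rcases ho1 with h0 | hf
    · omega
    · have := hi2 (b1 - 1) (by omega) (by omega); rw [this] at hf; exact absurd hf (by simp)

theorem pvSEnd_unique {l : List Char} {at_ e1 e2 : Nat}
    (h1 : pvSEnd l at_ e1) (h2 : pvSEnd l at_ e2) : e1 = e2 := by
  obtain ⟨ha1, hl1, hi1, ho1⟩ := h1
  obtain ⟨ha2, hl2, hi2, ho2⟩ := h2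
  by_contra hne
  rcases Nat.lt_or_ge e1 e2 with h | h
  · rcases ho1 with h0 | hf
    · omega
    · have := hi2 e1 (by omega) (by omega); rw [this] at hf; exact absurd hf (by simp)
  · have hlt : e2 < e1 := by omega
    rcases ho2 with h0 | hf
    · omega
    · have := hi1 e2 (by omega) (by omega); rw [this] at hf; exact absurd hf (by simp)

theorem pvBegLoop_spec (l : List Char) (at_ : Nat) :
    ∀ b, b ≤ at_ → (∀ j, b ≤ j → j < at_ → pvL (l.getD j ' ') = true) →
      pvSBeg l at_ (pvBegLoop l b) := by
  intro b
  induction b with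
  | zero => intro _ hi; exact ⟨Nat.zero_le _, hi, Or.inl rfl⟩
  | succ b ih =>
    intro hle hi
    rw [pvBegLoop]
    by_cases hc : pvLegal.contains (PySem.Chars.lowerChar (l.getD b ' ')) = true
    · rw [if_pos hc]
      refine ih (by omega) ?_
      intro j hbj hja
      rcases Nat.eq_or_lt_of_le hbj with rfl | h
      · exact hc
      · exact hi j (by omega) hja
    · rw [if_neg hc]
      exact ⟨hle, hi, Or.inr (by simpa [pvL] using hc)⟩

theorem pvEndLoop_spec (l : List Char) (at_ : Nat) (hat : at_ < l.length)
    (hL : pvL (l.getD at_ ' ') = true) :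
    ∀ e, at_ ≤ e → e ≤ l.length → (∀ j, at_ ≤ j → j < e → pvL (l.getD j ' ') = true) →
      pvSEnd l at_ (pvEndLoop l e) := by
  intro e
  induction e using pvEndLoop.induct l with
  | case1 e h hc ih =>
    intro hae hel hi
    rw [pvEndLoop, dif_pos h, if_pos hc]
    refine ih (by omega) (by omega) ?_
    intro j haj hje
    rcases Nat.lt_or_ge j e with hj | hj
    · exact hi j haj hj
    · have hje' : j = e := by omega
      subst hje'
      rw [pvGetD_eq h]
      simpa [pvL] using hc
  | case2 e h hc =>
    intro hae hel hi
    have hne : at_ ≠ e := by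
      intro heq; subst heq
      unfold pvL at hL
      rw [pvGetD_eq h] at hL
      exact hc hL
    rw [pvEndLoop, dif_pos h, if_neg hc]
    exact ⟨by omega, by omega, hi, Or.inr (by rw [pvGetD_eq h]; simpa [pvL] using hc)⟩
  | case3 e h =>
    intro hae hel hi
    rw [pvEndLoop, dif_neg h]
    have hel' : e = l.length := by omega
    subst hel'
    exact ⟨by omega, le_refl _, hi, Or.inl rfl⟩

-- the B test, rewritten to A's test
theorem pvFindRun_test (c : Char) :
    PySem.Set.contains pvLegalSet (PySem.Chars.lowerChar c) = pvL c := by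
  rw [pvLegalSet_eq_pvLegal]; simp [pvL]

-- phase 2 of B's scan: past the '@', beg is frozen and the scan finds the run's end
theorem pvFindRun_phase2 (l : List Char) (at_ : Nat) (hat : at_ < l.length) :
    ∀ cs i beg, l.drop i = cs → at_ < i →
      (∀ j, at_ ≤ j → j < i → pvL (l.getD j ' ') = true) →
      (pvFindRun l at_ cs i beg).1 = beg ∧ pvSEnd l at_ (pvFindRun l at_ cs i beg).2 := by
  intro cs
  induction cs with
  | nil =>
    intro i beg hdrop hai hi
    have hlen := congrArg List.length hdrop
    simp [List.length_drop] at hlen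
    rw [pvFindRun]
    exact ⟨rfl, by omega, le_refl _, (fun j haj hjl => hi j haj (by omega)), Or.inl rfl⟩
  | cons c cs ih =>
    intro i beg hdrop hai hi
    obtain ⟨hc, hil, hdrop'⟩ := pvDrop_head hdrop
    rw [pvFindRun, pvFindRun_test]
    by_cases hLc : pvL c = true
    · rw [hLc]
      simp only [Bool.not_true, Bool.false_eq_true, if_false]
      refine ih (i + 1) beg hdrop' (by omega) ?_
      intro j haj hji
      rcases Nat.lt_or_ge j i with hj | hj
      · exact hi j haj hj
      · have hji' : j = i := by omega
        subst hji'; rw [hc]; exact hLc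
    · have hf : pvL c = false := by simpa using hLc
      rw [hf]
      simp only [Bool.not_false, if_true]
      rw [if_neg (by omega)]
      exact ⟨rfl, ⟨by omega, by omega, hi, Or.inr (by rw [hc]; exact hf)⟩⟩

-- phase 1 of B's scan: up to the '@', beg tracks 1 + the last illegal index seen
theorem pvFindRun_phase1 (l : List Char) (at_ : Nat) (hat : at_ < l.length)
    (hL : pvL (l.getD at_ ' ') = true) :
    ∀ cs i beg, l.drop i = cs → i ≤ at_ → beg ≤ i →
      (∀ j, beg ≤ j → j < i → pvL (l.getD j ' ') = true) →
      (beg = 0 ∨ pvL (l.getD (beg - 1) ' ') = false) →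
      pvSBeg l at_ (pvFindRun l at_ cs i beg).1 ∧ pvSEnd l at_ (pvFindRun l at_ cs i beg).2 := by
  intro cs
  induction cs with
  | nil =>
    intro i beg hdrop hia _ _ _
    exfalso
    have hlen := congrArg List.length hdrop
    simp [List.length_drop] at hlen
    omega
  | cons c cs ih =>
    intro i beg hdrop hia hbi hi hbound
    obtain ⟨hc, hil, hdrop'⟩ := pvDrop_head hdrop
    rw [pvFindRun, pvFindRun_test]
    by_cases hLc : pvL c = true
    · rw [hLc]
      simp only [Bool.not_true, Bool.false_eq_true, if_false]
      rcases Nat.lt_or_ge i at_ with hcase | hcase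
      · -- still left of the '@': stay in phase 1
        refine ih (i + 1) beg hdrop' (by omega) (by omega) ?_ hbound
        intro j hbj hji
        rcases Nat.lt_or_ge j i with hj | hj
        · exact hi j hbj hj
        · have hji' : j = i := by omega
          subst hji'; rw [hc]; exact hLc
      · -- i = at_: the '@' itself is legal, switch to phase 2
        have hieq : i = at_ := by omega
        subst hieq
        have h2 := pvFindRun_phase2 l i hat cs (i + 1) beg hdrop' (by omega) ?_
        · refine ⟨?_, h2.2⟩
          rw [h2.1]
          exact ⟨hbi, hi, hbound⟩
        · intro j haj hji
          have hji' : j = i := by omega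
          subst hji'; rw [hc]; exact hLc
    · have hf : pvL c = false := by simpa using hLc
      rw [hf]
      simp only [Bool.not_false, if_true]
      have hlt : at_ ≠ i := by
        intro heq; subst heq; rw [hc] at hL; rw [hL] at hf; exact Bool.noConfusion hf
      rw [if_pos (by omega)]
      refine ih (i + 1) (i + 1) hdrop' (by omega) (le_refl _) ?_ ?_
      · intro j hj1 hj2; omega
      · refine Or.inr ?_
        have hsub : i + 1 - 1 = i := rfl
        rw [hsub, hc]; exact hf

-- the first '@' : position, bound, character
theorem pvAt_spec {l : List Char} (h : PySem.Chars.isIn ['@'] l = true) :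
    (PySem.Chars.find l ['@']).toNat < l.length ∧
      l.getD (PySem.Chars.find l ['@']).toNat ' ' = '@' := by
  have hnn : 0 ≤ PySem.Chars.find l ['@'] := (PySem.Chars.find_nonneg_iff l ['@']).mpr
    ((PySem.Chars.isIn_iff_infix _ _).mp h)
  obtain ⟨hpre, -⟩ := PySem.Chars.find_spec hnn
  obtain ⟨t, ht⟩ := hpre
  obtain ⟨hc, hlen, -⟩ := pvDrop_head ht.symm
  exact ⟨hlen, hc⟩

-- ===== VERDICT (by name: the statement is the Claim_ definition above) =====
theorem line2lol_spec : Claim_equal_line2lol := by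
  intro lin_in _
  unfold Spec_line2lol line2lol line2lol_alt
  by_cases h : PySem.Chars.isIn ['@'] lin_in.toList = true
  · simp only [h, Bool.not_true, Bool.false_eq_true, if_false, if_true]
    set l := lin_in.toList with hl
    set at_ := (PySem.Chars.find l ['@']).toNat with hat_
    obtain ⟨hlen, hchar⟩ := pvAt_spec h
    have hL : pvL (l.getD at_ ' ') = true := by rw [hchar]; decide
    have hA1 := pvBegLoop_spec l at_ at_ (le_refl _) (by intro j h1 h2; omega)
    have hA2 := pvEndLoop_spec l at_ hlen hL at_ (le_refl _) (by omega) (by intro j h1 h2; omega)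
    have hB := pvFindRun_phase1 l at_ hlen hL l 0 0 (by simp) (by omega) (le_refl _)
      (by intro j h1 h2; omega) (Or.inl rfl)
    have e1 : pvBegLoop l at_ = (pvFindRun l at_ l 0 0).1 := pvSBeg_unique hA1 hB.1
    have e2 : pvEndLoop l at_ = (pvFindRun l at_ l 0 0).2 := pvSEnd_unique hA2 hB.2
    rw [e1, e2]
  · have hf : PySem.Chars.isIn ['@'] lin_in.toList = false := by simpa using h
    simp only [hf, Bool.not_false, Bool.false_eq_true, if_false, if_true]
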